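-- pv_equiv track=rewrite | github.com/JIT-LSM/JIT_LSM | LargeModel/functions/spilt_code.py | find_return_type
-- ===== SOURCE A (Python) =====
-- def find_return_type(start_line,code,modifiers):
--     code_lines = code.splitlines()
--     line = code_lines[start_line]
--     relevant_part = line.strip()
--     type_start = False
--     return_type = []
--     find_modifiers = False
--     if modifiers == '':
--         find_modifiers = True
--     ##如果识别到空格，且已经在前面找到函数修饰符，并且已经明确第二个非空字符已经出现即返回类型已经全部提取
--     for char in relevant_part:
--         if char == " ":
--             if type_start:
--                 break
--             else:
--                 continue
--         if find_modifiers: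
--             return_type.append(char)
--             type_start =True
--             continue
--         if char == modifiers:
--             find_modifiers = True
--     return ''.join(return_type)
-- ===== SOURCE B (Python) =====
-- def find_return_type(start_line, code, modifiers):
--     rp = code.splitlines()[start_line].strip()
--     if modifiers != '':
--         # only a single non-space character can ever match A-style scanning
--         if len(modifiers) != 1 or modifiers == ' ':
--             return ''
--         i = rp.find(modifiers)
--         if i == -1:
--             return ''
--         rp = rp[i + 1:].lstrip(' ')
--     end = rp.find(' ')
--     return rp if end == -1 else rp[:end]
-- ===== Notes on version B (the rewrite author's own statement) =====
-- stated objective: simpler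
-- what changed: A's single stateful character scan with three mutable flags is replaced by a str.find/slice/lstrip pipeline: locate the single-character modifier, slice past it, strip leading spaces, and cut the first token at the next space; multi-character or space modifiers return '' directly.
import Mathlib
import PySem

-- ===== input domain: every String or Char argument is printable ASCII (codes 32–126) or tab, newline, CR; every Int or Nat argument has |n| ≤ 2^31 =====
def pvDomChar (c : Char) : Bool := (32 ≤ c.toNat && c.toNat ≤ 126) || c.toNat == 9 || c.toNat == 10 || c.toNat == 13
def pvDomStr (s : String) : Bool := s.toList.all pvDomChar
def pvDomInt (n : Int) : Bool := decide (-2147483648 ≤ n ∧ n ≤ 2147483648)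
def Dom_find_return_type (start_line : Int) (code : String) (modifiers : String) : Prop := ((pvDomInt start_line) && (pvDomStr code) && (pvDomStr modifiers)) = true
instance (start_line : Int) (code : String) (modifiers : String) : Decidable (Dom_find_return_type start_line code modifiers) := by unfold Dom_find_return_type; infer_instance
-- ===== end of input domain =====

-- B replaces A's stateful character-scan (three mutable flags) by a find/slice/strip pipeline: locate the
-- modifier character with str.find, slice past it, strip leading spaces, and cut the token at the next space
-- (objective: simpler decomposition; same cost).

-- ===== PORT A =====
-- A's for-loop over relevant_part with state (type_start, return_type, find_modifiers); break → return
def aLoop (modifiers : List Char) : List Char → Bool → List Char → Bool → List Char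
  | [], _, return_type, _ => return_type
  | char :: rest, type_start, return_type, find_modifiers =>
    if char = ' ' then
      if type_start then return_type
      else aLoop modifiers rest type_start return_type find_modifiers
    else if find_modifiers then aLoop modifiers rest true (return_type ++ [char]) find_modifiers
    else if [char] = modifiers then aLoop modifiers rest type_start return_type true
    else aLoop modifiers rest type_start return_type find_modifiers

def find_return_type (start_line : Int) (code : String) (modifiers : String) : String :=
  match PySem.List.pyGet? (PySem.Str.splitlines code) start_line with
  | none => ""  -- IndexError in Python; excluded by Pre_
  | some line =>
    let relevant_part := (PySem.Str.strip line).toList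
    String.mk (aLoop modifiers.toList relevant_part false [] (modifiers.toList == []))

-- ===== PORT B =====
-- Source B's shared tail: end = rp.find(' '); rp if end == -1 else rp[:end]
def firstTok (rp : List Char) : List Char :=
  let e := PySem.Chars.find rp [' ']
  if e = -1 then rp else PySem.Chars.slice rp none (some e)

def find_return_type_alt (start_line : Int) (code : String) (modifiers : String) : String :=
  match PySem.List.pyGet? (PySem.Str.splitlines code) start_line with
  | none => ""  -- IndexError in Python; excluded by Pre_
  | some line =>
    let rp := (PySem.Str.strip line).toList
    if modifiers.toList = [] then String.mk (firstTok rp)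
    else if modifiers.toList.length ≠ 1 ∨ modifiers.toList = [' '] then ""
    else
      let i := PySem.Chars.find rp modifiers.toList
      if i = -1 then ""
      else
        -- rp[i+1:].lstrip(' ') : lstrip(' ') ported by hand as dropWhile (= ' ') — exact (strips spaces only)
        String.mk (firstTok (List.dropWhile (fun d => d = ' ')
          (PySem.Chars.slice rp (some (i + 1)) none)))

-- ===== PRECONDITION & SPEC =====
-- Pre_ excludes exactly the inputs where code_lines[start_line] raises IndexError in Python.
def Pre_find_return_type (start_line : Int) (code : String) (modifiers : String) : Prop :=
  PySem.Raise.InRange (PySem.Str.splitlines code).length start_line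
instance (start_line : Int) (code : String) (modifiers : String) : Decidable (Pre_find_return_type start_line code modifiers) := by unfold Pre_find_return_type; infer_instance
def pvWitness_find_return_type : Int × String × String := (0, "public int f()", "c")

def Spec_find_return_type (start_line : Int) (code : String) (modifiers : String) (out : String) : Prop := out = find_return_type_alt start_line code modifiers
instance (start_line : Int) (code : String) (modifiers : String) (out : String) : Decidable (Spec_find_return_type start_line code modifiers out) := by unfold Spec_find_return_type; infer_instance

-- ===== CLAIM (what is proved, stated in full; the proofs are below) =====
def Claim_equal_find_return_type : Prop := ∀ (start_line : Int) (code : String) (modifiers : String), Dom_find_return_type start_line code modifiers → Pre_find_return_type start_line code modifiers → Spec_find_return_type start_line code modifiers (find_return_type start_line code modifiers)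

-- ===== LEMMAS AND PROOFS =====

-- A's loop once the modifier has been found and a type char already started: take until the next space
theorem aLoop_started (m : List Char) (l : List Char) (acc : List Char) :
    aLoop m l true acc true = acc ++ l.takeWhile (fun d => d ≠ ' ') := by
  induction l generalizing acc with
  | nil => simp [aLoop]
  | cons c t ih =>
    by_cases hc : c = ' '
    · subst hc; simp [aLoop]
    · simp [aLoop, hc, ih]

-- A's loop once the modifier has been found: skip spaces, then take until the next space
theorem aLoop_found (m : List Char) (l : List Char) (acc : List Char) :
    aLoop m l false acc true =
      acc ++ (l.dropWhile (fun d => d = ' ')).takeWhile (fun d => d ≠ ' ') := by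
  induction l generalizing acc with
  | nil => simp [aLoop]
  | cons c t ih =>
    by_cases hc : c = ' '
    · subst hc; simpa [aLoop] using ih acc
    · simp [aLoop, hc, aLoop_started]

-- A's loop hunting for a single non-space modifier char: skip to just past its first occurrence
theorem aLoop_hunt (c : Char) (hc : c ≠ ' ') (l : List Char) (acc : List Char) :
    aLoop [c] l false acc false =
      (if c ∈ l then aLoop [c] ((l.dropWhile (fun d => d ≠ c)).tail) false acc true else acc) := by
  induction l with
  | nil => simp [aLoop]
  | cons d t ih =>
    by_cases hd : d = c
    · subst hd; simp [aLoop, hc]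
    · by_cases hds : d = ' '
      · subst hds
        simp [aLoop, ih, Ne.symm hd, hd]
      · simp [aLoop, hds, hd, ih, Ne.symm hd]

-- A's loop can never find a modifier that is not a single non-space character
theorem aLoop_never (m : List Char) (hm : m.length ≠ 1 ∨ m = [' ']) (l : List Char) (acc : List Char) :
    aLoop m l false acc false = acc := by
  induction l with
  | nil => simp [aLoop]
  | cons d t ih =>
    by_cases hds : d = ' '
    · subst hds; simp [aLoop, ih]
    · have hne : [d] ≠ m := by
        rcases hm with hm | hm
        · intro h; exact hm (by rw [← h]; rfl)
        · subst hm; simp [hds]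
      simp [aLoop, hds, hne, ih]

-- drop past the takeWhile prefix is the dropWhile suffix
theorem drop_length_takeWhile (p : Char → Bool) (l : List Char) :
    l.drop (l.takeWhile p).length = l.dropWhile p := by
  induction l with
  | nil => simp
  | cons d t ih =>
    by_cases hd : p d
    · simpa [hd] using ih
    · simp [hd]

-- singleton-prefix characterisation
theorem prefix_singleton (c : Char) (l : List Char) : [c] <+: l ↔ ∃ t, l = c :: t := by
  cases l with
  | nil => simp
  | cons d t =>
    constructor
    · intro h
      have := List.cons_prefix_cons.mp h
      exact ⟨t, by rw [this.1]⟩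
    · rintro ⟨t', ht⟩
      cases ht
      exact ⟨t, rfl⟩

theorem no_prefix_before (c : Char) (l : List Char) (i : Nat)
    (h : i < (l.takeWhile (fun d => d ≠ c)).length) : ¬ [c] <+: l.drop i := by
  induction l generalizing i with
  | nil => simp at h
  | cons d t ih =>
    rw [List.takeWhile_cons] at h
    by_cases hd : d = c
    · simp [hd] at h
    · rw [if_pos (by simpa using hd), List.length_cons] at h
      cases i with
      | zero =>
        intro hp
        rcases (prefix_singleton c (d :: t)).mp hp with ⟨t', ht⟩
        exact hd (by injection ht)
      | succ j => simpa using ih j (by omega)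

theorem prefix_at (c : Char) (l : List Char) (h : c ∈ l) :
    [c] <+: l.drop (l.takeWhile (fun d => d ≠ c)).length := by
  induction l with
  | nil => simp at h
  | cons d t ih =>
    by_cases hd : d = c
    · subst hd; simp
    · have hct : c ∈ t := by
        rcases List.mem_cons.mp h with h1 | h1
        · exact absurd h1.symm hd
        · exact h1
      simpa [hd] using ih hct

-- str.find with a single-character needle
theorem findSingleton (c : Char) (l : List Char) :
    PySem.Chars.find l [c] =
      (if c ∈ l then ((l.takeWhile (fun d => d ≠ c)).length : Int) else -1) := by
  by_cases h : c ∈ l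
  · have hinf : [c] <:+: l := by
      rcases List.append_of_mem h with ⟨s, t, rfl⟩
      exact ⟨s, t, by simp⟩
    have hnn : 0 ≤ PySem.Chars.find l [c] := (PySem.Chars.find_nonneg_iff l [c]).mpr hinf
    obtain ⟨hpre, hmin⟩ := PySem.Chars.find_spec hnn
    set n := (PySem.Chars.find l [c]).toNat with hn
    set k := (l.takeWhile (fun d => d ≠ c)).length with hk
    have hnk : n = k := by
      rcases Nat.lt_trichotomy n k with hlt | heq | hgt
      · exact absurd hpre (no_prefix_before c l n hlt)
      · exact heq
      · exact absurd (prefix_at c l h) (hmin k hgt)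
    have : PySem.Chars.find l [c] = (n : Int) := (Int.toNat_of_nonneg hnn).symm
    rw [this, hnk, if_pos h]
  · have : PySem.Chars.find l [c] = -1 :=
      (PySem.Chars.find_eq_neg_one_iff l [c]).mpr (fun hinf => h (hinf.subset (by simp)))
    simp [h, this]

-- Source B's shared tail computes the first space-separated token
theorem firstTok_eq (l : List Char) : firstTok l = l.takeWhile (fun d => d ≠ ' ') := by
  unfold firstTok
  rw [findSingleton]
  by_cases h : (' ' : Char) ∈ l
  · have hk : (0:Int) ≤ ((l.takeWhile (fun d => d ≠ ' ')).length : Int) := by positivity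
    simp only [if_pos h]
    rw [if_neg (by omega), PySem.Chars.slice_eq_listSlice, PySem.List.slice_to l hk]
    have := (List.prefix_iff_eq_take).mp (List.takeWhile_prefix (l := l) (fun d => d ≠ ' '))
    simpa using this.symm
  · simp only [if_neg h, if_pos]
    exact ((List.takeWhile_eq_self_iff).mpr (fun x hx => by
      simp only [decide_eq_true_eq]
      intro hxe; exact h (hxe ▸ hx))).symm

-- a stripped line does not start with a space
theorem strip_no_leading_space (s : List Char) :
    (PySem.Chars.strip s).dropWhile (fun d => d = ' ') = PySem.Chars.strip s := by
  cases hs : PySem.Chars.strip s with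
  | nil => simp
  | cons c t =>
    have hpre : PySem.Chars.strip s <+: PySem.Chars.lstrip s := by
      unfold PySem.Chars.strip PySem.Chars.rstrip
      exact List.reverse_suffix.mp (by
        simpa using List.dropWhile_suffix (l := (PySem.Chars.lstrip s).reverse) PySem.Chars.isspace)
    have hls : ∃ t', PySem.Chars.lstrip s = c :: t' := by
      rcases hpre with ⟨r, hr⟩
      rw [hs] at hr
      exact ⟨t ++ r, by simpa using hr.symm⟩
    rcases hls with ⟨t', ht'⟩
    have hne : PySem.Chars.lstrip s ≠ [] := by simp [ht']
    have hhead : PySem.Chars.isspace ((PySem.Chars.lstrip s).head hne) = false := by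
      unfold PySem.Chars.lstrip at hne ⊢
      exact List.head_dropWhile_not PySem.Chars.isspace hne
    have hc : PySem.Chars.isspace c = false := by
      have : (PySem.Chars.lstrip s).head hne = c := by simp [ht']
      rwa [this] at hhead
    have hcs : c ≠ ' ' := by
      intro h; subst h; exact absurd hc (by decide)
    simp [hcs]

-- ===== VERDICT (by name: the statement is the Claim_ definition above) =====
theorem find_return_type_spec : Claim_equal_find_return_type := by
  intro start_line code modifiers _ _
  unfold Spec_find_return_type find_return_type find_return_type_alt
  cases hg : PySem.List.pyGet? (PySem.Str.splitlines code) start_line with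
  | none => rfl
  | some line =>
    dsimp only
    have hrpd : ((PySem.Str.strip line).toList).dropWhile (fun d => d = ' ')
        = (PySem.Str.strip line).toList := by
      rw [PySem.Str.toList_strip]; exact strip_no_leading_space _
    generalize hq : (PySem.Str.strip line).toList = rp at hrpd ⊢
    match hm : modifiers.toList with
    | [] =>
      rw [if_pos rfl, show (([] : List Char) == []) = true from rfl,
        aLoop_found, firstTok_eq, hrpd]
      simp
    | [c] =>
      by_cases hcs : c = ' '
      · subst hcs
        rw [if_neg (by simp), if_pos (Or.inr rfl),
          show (([' '] : List Char) == []) = false from rfl, aLoop_never _ (Or.inr rfl)]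
        rfl
      · rw [if_neg (by simp), if_neg (by simp [hcs]),
          show ((c :: [] : List Char) == []) = false from rfl,
          aLoop_hunt c hcs, findSingleton]
        by_cases hmem : c ∈ rp
        · rw [if_pos hmem, if_pos hmem, if_neg (by omega),
            PySem.Chars.slice_eq_listSlice, PySem.List.slice_from rp (by omega)]
          have hdrop : rp.drop (((rp.takeWhile (fun d => d ≠ c)).length : Int) + 1).toNat
              = (rp.dropWhile (fun d => d ≠ c)).tail := by
            have h1 : (((rp.takeWhile (fun d => d ≠ c)).length : Int) + 1).toNat
                = (rp.takeWhile (fun d => d ≠ c)).length + 1 := by omega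
            rw [h1, ← List.tail_drop, drop_length_takeWhile]
          rw [hdrop, aLoop_found, firstTok_eq]
          simp
        · rw [if_neg hmem, if_neg hmem, if_pos rfl]
          rfl
    | c :: d :: t =>
      rw [if_neg (by simp), if_pos (Or.inl (by simp)),
        show ((c :: d :: t : List Char) == []) = false from rfl,
        aLoop_never _ (Or.inl (by simp))]
      rfl
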